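-- pv_equiv track=rewrite | github.com/BaioSbubens/BigDataComputing | HW1/G050.py | step_B
-- ===== SOURCE A (Python) =====
-- def step_B(cells,M):
--     outliers = 0
--     uncertain = 0
--     for center in cells:
--         if center[1] <= M:
--             i,j = center[0]
--             tot_3x3 = 0
--             tot_7x7 = 0
--             for cell in cells:
--                 x,y = cell[0]
--                 if abs(x - i) <= 1 and abs(y - j) <= 1:
--                     tot_3x3 += cell[1]
--                 elif abs(x - i) <= 3 and abs(y - j) <= 3:
--                     tot_7x7 += cell[1]
--                 if tot_3x3 > M:
--                     break
--             tot_7x7 += tot_3x3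
--             if tot_7x7 <= M:
--                 outliers += center[1]
--             elif tot_3x3 <= M:
--                 uncertain += center[1]
--     return (outliers, uncertain)
-- ===== SOURCE B (Python) =====
-- def _upd(cell, center, s, M):
--     if s[2]:
--         return s
--     t3, t7, _ = s
--     dx = abs(cell[0][0] - center[0][0])
--     dy = abs(cell[0][1] - center[0][1])
--     if dx <= 1 and dy <= 1:
--         t3 += cell[1]
--     elif dx <= 3 and dy <= 3:
--         t7 += cell[1]
--     return (t3, t7, t3 > M)
--
--
-- def step_B(cells, M):
--     # loop interchange: one pass over the cells drives the window sums of ALL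
--     # eligible centers at once; a per-center done flag replaces A's break.
--     states = [(c, (0, 0, False)) for c in cells if c[1] <= M]
--     for cell in cells:
--         states = [(c, _upd(cell, c, s, M)) for (c, s) in states]
--     outliers = 0
--     uncertain = 0
--     for (c, (t3, t7r, _)) in states:
--         t7 = t7r + t3
--         if t7 <= M:
--             outliers += c[1]
--         elif t3 <= M:
--             uncertain += c[1]
--     return (outliers, uncertain)
-- ===== Notes on version B (the rewrite author's own statement) =====
-- stated objective: alternative
-- what changed: Loop interchange: instead of a nested scan of all cells per center with an early break, B makes a single pass over the cells that advances the 3x3/7x7 window sums of all eligible centers simultaneously (a per-center done flag playing the role of A's break), then classifies every center at the end.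
import Mathlib
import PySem

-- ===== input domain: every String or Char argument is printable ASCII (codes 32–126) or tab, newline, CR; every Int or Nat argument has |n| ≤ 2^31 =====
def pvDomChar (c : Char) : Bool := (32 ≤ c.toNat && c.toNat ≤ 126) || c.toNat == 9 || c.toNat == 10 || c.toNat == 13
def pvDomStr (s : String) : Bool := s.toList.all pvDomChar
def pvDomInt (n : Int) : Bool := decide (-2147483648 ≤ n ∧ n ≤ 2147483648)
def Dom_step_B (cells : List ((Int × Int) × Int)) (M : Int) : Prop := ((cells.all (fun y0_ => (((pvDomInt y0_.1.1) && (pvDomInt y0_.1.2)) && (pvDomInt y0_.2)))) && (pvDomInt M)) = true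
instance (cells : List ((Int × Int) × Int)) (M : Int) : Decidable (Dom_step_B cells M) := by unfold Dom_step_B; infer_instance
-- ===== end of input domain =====

-- B replaces A's per-center rescans of the whole cell list (with an early break)
-- by ONE interchanged traversal: a pass over the cells updating all eligible
-- centers' window sums at once (a done flag replacing the break); alternative
-- decomposition, same exact result.

-- ===== PORT A =====
-- inner 'for cell in cells' loop of A, with its 'break' as an early return
def innerA (cells : List ((Int × Int) × Int)) (i j M : Int) (t3 t7 : Int) : Int × Int :=
  match cells with
  | [] => (t3, t7)
  | cell :: rest =>
    let p := if |cell.1.1 - i| ≤ 1 ∧ |cell.1.2 - j| ≤ 1 then (t3 + cell.2, t7)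
      else if |cell.1.1 - i| ≤ 3 ∧ |cell.1.2 - j| ≤ 3 then (t3, t7 + cell.2)
      else (t3, t7)
    if p.1 > M then p else innerA rest i j M p.1 p.2

def step_B (cells : List ((Int × Int) × Int)) (M : Int) : Int × Int :=
  cells.foldl (fun acc center =>
    if center.2 ≤ M then
      let r := innerA cells center.1.1 center.1.2 M 0 0
      let t7 := r.2 + r.1
      if t7 ≤ M then (acc.1 + center.2, acc.2)
      else if r.1 ≤ M then (acc.1, acc.2 + center.2)
      else acc
    else acc) (0, 0)

-- ===== PORT B =====
-- Source B's _upd: advance one center's state (t3, t7ring, done) by one cell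
def updB (cell : (Int × Int) × Int) (c : (Int × Int) × Int) (s : Int × Int × Bool) (M : Int) : Int × Int × Bool :=
  if s.2.2 then s
  else
    let dx := |cell.1.1 - c.1.1|
    let dy := |cell.1.2 - c.1.2|
    let p := if dx ≤ 1 ∧ dy ≤ 1 then (s.1 + cell.2, s.2.1)
      else if dx ≤ 3 ∧ dy ≤ 3 then (s.1, s.2.1 + cell.2)
      else (s.1, s.2.1)
    (p.1, p.2, decide (p.1 > M))

def step_B_alt (cells : List ((Int × Int) × Int)) (M : Int) : Int × Int :=
  let init := (cells.filter (fun c => decide (c.2 ≤ M))).map (fun c => (c, ((0:Int), (0:Int), false)))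
  let states := cells.foldl (fun sts cell => sts.map (fun p => (p.1, updB cell p.1 p.2 M))) init
  states.foldl (fun acc p =>
    let t7 := p.2.2.1 + p.2.1
    if t7 ≤ M then (acc.1 + p.1.2, acc.2)
    else if p.2.1 ≤ M then (acc.1, acc.2 + p.1.2)
    else acc) (0, 0)

-- ===== PRECONDITION & SPEC =====
def Spec_step_B (cells : List ((Int × Int) × Int)) (M : Int) (out : Int × Int) : Prop := out = step_B_alt cells M
instance (cells : List ((Int × Int) × Int)) (M : Int) (out : Int × Int) : Decidable (Spec_step_B cells M out) := by unfold Spec_step_B; infer_instance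

-- ===== CLAIM (what is proved, stated in full; the proofs are below) =====
def Claim_equal_step_B : Prop := ∀ (cells : List ((Int × Int) × Int)) (M : Int), Dom_step_B cells M → Spec_step_B cells M (step_B cells M)

-- ===== LEMMAS AND PROOFS =====

-- a done state is frozen
theorem foldl_updB_done (M : Int) (c : (Int × Int) × Int) :
    ∀ (l : List ((Int × Int) × Int)) (t3 t7 : Int),
      l.foldl (fun s cell => updB cell c s M) (t3, t7, true) = (t3, t7, true) := by
  intro l
  induction l with
  | nil => intro t3 t7; rfl
  | cons cell rest ih =>
      intro t3 t7
      simp only [List.foldl_cons, updB]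
      exact ih t3 t7

-- B's per-center fold over the cells simulates A's inner loop with break
theorem foldl_updB_sim (M : Int) (c : (Int × Int) × Int) :
    ∀ (l : List ((Int × Int) × Int)) (t3 t7 : Int),
      (((l.foldl (fun s cell => updB cell c s M) (t3, t7, false)).1,
        (l.foldl (fun s cell => updB cell c s M) (t3, t7, false)).2.1) : Int × Int)
      = innerA l c.1.1 c.1.2 M t3 t7 := by
  intro l
  induction l with
  | nil => intro t3 t7; rfl
  | cons cell rest ih =>
      intro t3 t7
      simp only [List.foldl_cons]
      have hs : updB cell c (t3, t7, false) M =
          ((if |cell.1.1 - c.1.1| ≤ 1 ∧ |cell.1.2 - c.1.2| ≤ 1 then ((t3 + cell.2 : Int), (t7 : Int))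
            else if |cell.1.1 - c.1.1| ≤ 3 ∧ |cell.1.2 - c.1.2| ≤ 3 then (t3, t7 + cell.2)
            else (t3, t7)).1,
           (if |cell.1.1 - c.1.1| ≤ 1 ∧ |cell.1.2 - c.1.2| ≤ 1 then ((t3 + cell.2 : Int), (t7 : Int))
            else if |cell.1.1 - c.1.1| ≤ 3 ∧ |cell.1.2 - c.1.2| ≤ 3 then (t3, t7 + cell.2)
            else (t3, t7)).2,
           decide ((if |cell.1.1 - c.1.1| ≤ 1 ∧ |cell.1.2 - c.1.2| ≤ 1 then ((t3 + cell.2 : Int), (t7 : Int))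
            else if |cell.1.1 - c.1.1| ≤ 3 ∧ |cell.1.2 - c.1.2| ≤ 3 then (t3, t7 + cell.2)
            else (t3, t7)).1 > M)) := by
        simp [updB]
      rw [hs, innerA]
      generalize (if |cell.1.1 - c.1.1| ≤ 1 ∧ |cell.1.2 - c.1.2| ≤ 1 then ((t3 + cell.2 : Int), (t7 : Int))
            else if |cell.1.1 - c.1.1| ≤ 3 ∧ |cell.1.2 - c.1.2| ≤ 3 then (t3, t7 + cell.2)
            else (t3, t7)) = q
      by_cases hb : q.1 > M
      · rw [decide_eq_true hb, if_pos hb, foldl_updB_done]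
      · rw [decide_eq_false hb, if_neg hb]
        exact ih q.1 q.2

-- the interchanged fold acts on each paired center-state independently
theorem foldl_map_exchange (M : Int) :
    ∀ (l : List ((Int × Int) × Int))
      (sts : List (((Int × Int) × Int) × (Int × Int × Bool))),
      l.foldl (fun sts cell => sts.map (fun p => (p.1, updB cell p.1 p.2 M))) sts
      = sts.map (fun p => (p.1, l.foldl (fun s cell => updB cell p.1 s M) p.2)) := by
  intro l
  induction l with
  | nil => intro sts; simp
  | cons cell rest ih =>
      intro sts
      simp only [List.foldl_cons, ih, List.map_map]
      rfl

theorem step_B_spec_aux (cells : List ((Int × Int) × Int)) (M : Int) :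
    step_B cells M = step_B_alt cells M := by
  unfold step_B step_B_alt
  simp only [foldl_map_exchange, List.map_map, List.foldl_map, List.foldl_filter]
  congr 1
  funext acc center
  simp only [Function.comp]
  by_cases hc : center.2 ≤ M
  · simp only [hc, decide_true, if_true]
    have h := foldl_updB_sim M center cells 0 0
    have h1 : (cells.foldl (fun s cell => updB cell center s M) (0, 0, false)).1
        = (innerA cells center.1.1 center.1.2 M 0 0).1 := by
      rw [← h]
    have h2 : (cells.foldl (fun s cell => updB cell center s M) (0, 0, false)).2.1
        = (innerA cells center.1.1 center.1.2 M 0 0).2 := by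
      rw [← h]
    simp only [h1, h2]
  · simp only [hc, decide_false, Bool.false_eq_true, if_false]

-- ===== VERDICT (by name: the statement is the Claim_ definition above) =====
theorem step_B_spec : Claim_equal_step_B := by
  intro cells M _
  unfold Spec_step_B
  exact step_B_spec_aux cells M
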